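-- pv_equiv track=rewrite | github.com/yeongseon/benchflow | benchflow/cli/main.py | _parse_database_choices
-- ===== SOURCE A (Python) =====
-- def _parse_database_choices(raw: str) -> list[str]:
--     alias_map = {
--         "postgres": "postgresql",
--         "postgresql": "postgresql",
--         "mysql": "mysql",
--         "cubrid": "cubrid",
--         "custom": "custom",
--     }
--     choices: list[str] = []
--     for token in raw.split(","):
--         cleaned = token.strip().lower()
--         mapped = alias_map.get(cleaned)
--         if mapped and mapped not in choices:
--             choices.append(mapped)
--     return choices
-- ===== SOURCE B (Python) =====
-- def _first_index(tokens, alias_map, name):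
--     for i, token in enumerate(tokens):
--         if alias_map.get(token) == name:
--             return i
--     return None
--
--
-- def _parse_database_choices(raw: str) -> list[str]:
--     alias_map = {
--         "postgres": "postgresql",
--         "postgresql": "postgresql",
--         "mysql": "mysql",
--         "cubrid": "cubrid",
--         "custom": "custom",
--     }
--     tokens = [token.strip().lower() for token in raw.split(",")]
--     found = []
--     for name in ("postgresql", "mysql", "cubrid", "custom"):
--         idx = _first_index(tokens, alias_map, name)
--         if idx is not None:
--             found.append((idx, name))
--     found.sort(key=lambda pair: pair[0])
--     return [name for _, name in found]
-- ===== Notes on version B (the rewrite author's own statement) =====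
-- stated objective: alternative
-- what changed: Instead of A's single fused loop that appends after a linear membership scan of the growing result, B normalizes all tokens, then for each of the four canonical database names finds its first token index, and finally sorts the (index, name) pairs by index and returns the names, so no dedup/membership structure exists at all.
import Mathlib
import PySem

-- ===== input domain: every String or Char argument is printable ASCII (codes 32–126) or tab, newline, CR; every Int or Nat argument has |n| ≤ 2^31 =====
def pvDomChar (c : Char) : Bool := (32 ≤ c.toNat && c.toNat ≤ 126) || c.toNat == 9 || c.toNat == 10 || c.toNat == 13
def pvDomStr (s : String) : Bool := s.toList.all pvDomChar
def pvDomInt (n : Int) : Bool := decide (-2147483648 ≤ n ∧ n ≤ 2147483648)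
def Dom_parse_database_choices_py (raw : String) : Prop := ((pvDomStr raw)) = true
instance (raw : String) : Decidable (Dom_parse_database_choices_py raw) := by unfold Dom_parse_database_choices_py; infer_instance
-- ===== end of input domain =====

-- B replaces A's fused append-after-membership-scan loop by: normalize all tokens, find the first
-- token index of each of the four canonical names, sort the (index, name) pairs by index and emit
-- the names — a different algorithm with no dedup/membership structure; same results (alternative).

-- ===== PORT A =====
def parse_database_choices_py (raw : String) : List String :=
  let aliasMap : PySem.Dict String String := PySem.Dict.ofList
    [("postgres", "postgresql"), ("postgresql", "postgresql"), ("mysql", "mysql"),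
     ("cubrid", "cubrid"), ("custom", "custom")]
  ((PySem.Str.split? raw ",").getD []).foldl (fun choices token =>
    let cleaned := PySem.Str.lower (PySem.Str.strip token)
    let mapped := aliasMap.get? cleaned
    -- 'if mapped and mapped not in choices': truthiness of Optional[str] = some non-empty string
    match mapped with
    | some m => if m == "" then choices
                else if choices.contains m then choices else choices ++ [m]
    | none => choices) []

-- ===== PORT B =====
-- Source B's _first_index: linear scan with enumerate, returning the first matching index or None
def pbFirstIndex (aliasMap : PySem.Dict String String) (name : String) : Int → List String → Option Int
  | _, [] => none
  | i, token :: rest =>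
      if aliasMap.get? token == some name then some i
      else pbFirstIndex aliasMap name (i + 1) rest

def parse_database_choices_py_alt (raw : String) : List String :=
  let aliasMap : PySem.Dict String String := PySem.Dict.ofList
    [("postgres", "postgresql"), ("postgresql", "postgresql"), ("mysql", "mysql"),
     ("cubrid", "cubrid"), ("custom", "custom")]
  let tokens := ((PySem.Str.split? raw ",").getD []).map
    (fun token => PySem.Str.lower (PySem.Str.strip token))
  let found := ["postgresql", "mysql", "cubrid", "custom"].foldl
    (fun found name =>
      match pbFirstIndex aliasMap name 0 tokens with
      | some idx => found ++ [(idx, name)]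
      | none => found) ([] : List (Int × String))
  (PySem.List.sorted found (fun pair => pair.1)).map (fun pair => pair.2)

-- ===== PRECONDITION & SPEC =====
def Spec_parse_database_choices_py (raw : String) (out : List String) : Prop := out = parse_database_choices_py_alt raw
instance (raw : String) (out : List String) : Decidable (Spec_parse_database_choices_py raw out) := by unfold Spec_parse_database_choices_py; infer_instance

-- ===== CLAIM (what is proved, stated in full; the proofs are below) =====
def Claim_equal_parse_database_choices_py : Prop := ∀ (raw : String), Dom_parse_database_choices_py raw → Spec_parse_database_choices_py raw (parse_database_choices_py raw)

-- ===== LEMMAS AND PROOFS =====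

-- the shared alias map, named for the lemmas below
def pvAM : PySem.Dict String String := PySem.Dict.ofList
  [("postgres", "postgresql"), ("postgresql", "postgresql"), ("mysql", "mysql"),
   ("cubrid", "cubrid"), ("custom", "custom")]

def pvCanon : List String := ["postgresql", "mysql", "cubrid", "custom"]

-- every value the alias map can return is a non-empty canonical name
theorem pv_get_cases (k : String) :
    pvAM.get? k = none ∨ ∃ m, pvAM.get? k = some m ∧ m ∈ pvCanon ∧ m ≠ "" := by
  by_cases h1 : k = "postgres"
  · right; exact ⟨"postgresql", by subst h1; decide, by decide, by decide⟩
  all_goals by_cases h2 : k = "postgresql"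
  · right; exact ⟨"postgresql", by subst h2; decide, by decide, by decide⟩
  all_goals by_cases h3 : k = "mysql"
  · right; exact ⟨"mysql", by subst h3; decide, by decide, by decide⟩
  all_goals by_cases h4 : k = "cubrid"
  · right; exact ⟨"cubrid", by subst h4; decide, by decide, by decide⟩
  all_goals by_cases h5 : k = "custom"
  · right; exact ⟨"custom", by subst h5; decide, by decide, by decide⟩
  · left
    have e : pvAM = PySem.Dict.mk
        [("postgres", "postgresql"), ("postgresql", "postgresql"), ("mysql", "mysql"),
         ("cubrid", "cubrid"), ("custom", "custom")] := rfl
    rw [e]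
    have b1 : ("postgres" == k) = false := by simp [Ne.symm h1]
    have b2 : ("postgresql" == k) = false := by simp [Ne.symm h2]
    have b3 : ("mysql" == k) = false := by simp [Ne.symm h3]
    have b4 : ("cubrid" == k) = false := by simp [Ne.symm h4]
    have b5 : ("custom" == k) = false := by simp [Ne.symm h5]
    simp [PySem.Dict.get?, List.find?, b1, b2, b3, b4, b5]

-- A's fused loop, over any token list and any accumulator, is Set.update of the accumulator
-- with the truthy mapped values.
theorem pv_fused_eq (aliasMap : PySem.Dict String String) :
    ∀ (ts : List String) (acc : List String),
      ts.foldl (fun choices token =>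
        let cleaned := PySem.Str.lower (PySem.Str.strip token)
        let mapped := aliasMap.get? cleaned
        match mapped with
        | some m => if m == "" then choices
                    else if choices.contains m then choices else choices ++ [m]
        | none => choices) acc
      = PySem.Set.update acc (ts.filterMap (fun token =>
          match aliasMap.get? (PySem.Str.lower (PySem.Str.strip token)) with
          | some m => if m == "" then none else some m
          | none => none)) := by
  intro ts
  induction ts with
  | nil => intro acc; simp [PySem.Set.update]
  | cons t ts ih =>
    intro acc
    simp only [List.foldl_cons, List.filterMap_cons]
    cases h : aliasMap.get? (PySem.Str.lower (PySem.Str.strip t)) with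
    | none => exact ih acc
    | some m =>
      cases hm : (m == "") with
      | true => simp only [hm, if_true]; exact ih acc
      | false =>
        simp only [hm, Bool.false_eq_true, if_false]
        rw [ih, PySem.Set.update_cons]
        simp [PySem.Set.add, PySem.Set.contains]

-- B's outer loop over the canonical names is a filter-then-map over them
theorem pv_found_eq (o : String → Option Int) :
    ∀ (cs : List String) (acc : List (Int × String)),
      cs.foldl (fun found name =>
        match o name with
        | some idx => found ++ [(idx, name)]
        | none => found) acc
      = acc ++ (cs.filter (fun n => (o n).isSome)).map (fun n => ((o n).getD 0, n)) := by
  intro cs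
  induction cs with
  | nil => intro acc; simp
  | cons c cs ih =>
    intro acc
    cases h : o c <;> simp [List.foldl_cons, h, ih]

-- pbFirstIndex never returns an index below its start
theorem pv_fi_ge (a : PySem.Dict String String) (n : String) :
    ∀ (ts : List String) (i j : Int), pbFirstIndex a n i ts = some j → i ≤ j := by
  intro ts
  induction ts with
  | nil => intro i j h; simp [pbFirstIndex] at h
  | cons t ts ih =>
    intro i j h
    by_cases ht : a.get? t == some n
    · simp [pbFirstIndex, ht] at h; omega
    · simp [pbFirstIndex, ht] at h
      have := ih (i + 1) j h; omega

-- pbFirstIndex succeeds exactly when some token maps to the name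
theorem pv_fi_isSome (a : PySem.Dict String String) (n : String) :
    ∀ (ts : List String) (i : Int),
      (pbFirstIndex a n i ts).isSome = true ↔ ∃ t ∈ ts, a.get? t = some n := by
  intro ts
  induction ts with
  | nil => intro i; simp [pbFirstIndex]
  | cons t ts ih =>
    intro i
    by_cases ht : a.get? t = some n
    · simp [pbFirstIndex, ht]
    · have : (a.get? t == some n) = false := by simp [ht]
      simp [pbFirstIndex, this, ih (i + 1), ht]

-- foldl add over a filtered list with a filtered accumulator = filter of the foldl
theorem pv_foldl_add_filter {α : Type} [BEq α] [LawfulBEq α] (p : α → Bool) :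
    ∀ (L : List α) (acc : List α),
      (L.filter p).foldl PySem.Set.add (acc.filter p) = (L.foldl PySem.Set.add acc).filter p := by
  intro L
  induction L with
  | nil => intro acc; simp
  | cons x L ih =>
    intro acc
    rw [List.filter_cons, List.foldl_cons]
    by_cases hp : p x
    · simp only [hp, if_true, List.foldl_cons]
      have hadd : PySem.Set.add (acc.filter p) x = (PySem.Set.add acc x).filter p := by
        by_cases hmem : x ∈ acc
        · simp [PySem.Set.add, PySem.Set.contains, hmem, hp]
        · simp [PySem.Set.add, PySem.Set.contains, hmem, hp, List.filter_append]
      rw [hadd, ih]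
    · simp only [hp, Bool.false_eq_true, if_false]
      have hadd : (PySem.Set.add acc x).filter p = acc.filter p := by
        by_cases hmem : x ∈ acc
        · simp [PySem.Set.add, PySem.Set.contains, hmem]
        · simp [PySem.Set.add, PySem.Set.contains, hmem, List.filter_append, hp]
      rw [← hadd]
      exact ih (PySem.Set.add acc x)

theorem pv_ofList_filter {α : Type} [BEq α] [LawfulBEq α] (p : α → Bool) (L : List α) :
    PySem.Set.ofList (L.filter p) = (PySem.Set.ofList L).filter p := by
  have := pv_foldl_add_filter p L []
  simpa [PySem.Set.ofList_eq_foldl] using this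

-- foldl add with s prepended to the accumulator
theorem pv_foldl_add_prefix {α : Type} [BEq α] [LawfulBEq α] :
    ∀ (L s t : List α),
      L.foldl PySem.Set.add (s ++ t) = s ++ (L.filter (fun y => !(s.contains y))).foldl PySem.Set.add t := by
  intro L
  induction L with
  | nil => intro s t; simp
  | cons y L ih =>
    intro s t
    rw [List.foldl_cons, List.filter_cons]
    by_cases hs : y ∈ s
    · have h1 : s.contains y = true := by simp [hs]
      have h2 : PySem.Set.add (s ++ t) y = s ++ t := by
        simp [PySem.Set.add, PySem.Set.contains, hs]
      simp only [h1, Bool.not_true, Bool.false_eq_true, if_false, h2]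
      exact ih s t
    · have h1 : s.contains y = false := by simp [hs]
      have h2 : PySem.Set.add (s ++ t) y = s ++ PySem.Set.add t y := by
        by_cases htm : y ∈ t
        · simp [PySem.Set.add, PySem.Set.contains, hs, htm]
        · simp [PySem.Set.add, PySem.Set.contains, hs, htm, List.append_assoc]
      simp only [h1, Bool.not_false, if_true, h2, List.foldl_cons]
      exact ih s (PySem.Set.add t y)

theorem pv_ofList_cons {α : Type} [BEq α] [LawfulBEq α] (x : α) (L : List α) :
    PySem.Set.ofList (x :: L) = x :: PySem.Set.ofList (L.filter (fun y => !(y == x))) := by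
  have h0 : PySem.Set.ofList (x :: L) = L.foldl PySem.Set.add ([x] ++ []) := by
    rw [PySem.Set.ofList_eq_foldl, List.foldl_cons]
    rfl
  rw [h0, pv_foldl_add_prefix]
  have : (fun y => !(List.contains [x] y)) = (fun y => !(y == x)) := by
    funext y; simp
  rw [this]
  simp [PySem.Set.ofList_eq_foldl]

-- the crux: first occurrences (as found by pbFirstIndex) strictly increase along the dedup order
theorem pv_crux (a : PySem.Dict String String) :
    ∀ (ts : List String) (i : Int),
      (PySem.Set.ofList (ts.filterMap a.get?)).Pairwise
        (fun x y => (pbFirstIndex a x i ts).getD 0 < (pbFirstIndex a y i ts).getD 0) := by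
  intro ts
  induction ts with
  | nil => intro i; simp [PySem.Set.ofList]
  | cons t rest ih =>
    intro i
    cases h : a.get? t with
    | none =>
      have hkey : ∀ x, pbFirstIndex a x i (t :: rest) = pbFirstIndex a x (i + 1) rest := by
        intro x; simp [pbFirstIndex, h]
      simp only [List.filterMap_cons, h]
      exact (ih (i + 1)).imp (fun {x y} hxy => by rw [hkey x, hkey y]; exact hxy)
    | some m =>
      simp only [List.filterMap_cons, h]
      rw [pv_ofList_cons]
      rw [List.pairwise_cons]
      set L' := rest.filterMap a.get? with hL'
      have hkeym : pbFirstIndex a m i (t :: rest) = some i := by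
        simp [pbFirstIndex, h]
      have hkeyne : ∀ x, x ≠ m → pbFirstIndex a x i (t :: rest) = pbFirstIndex a x (i + 1) rest := by
        intro x hx
        have : (a.get? t == some x) = false := by simp [h, Ne.symm hx]
        simp [pbFirstIndex, this]
      constructor
      · intro b hb
        have hbmem : b ∈ L'.filter (fun y => !(y == m)) :=
          (PySem.Set.mem_ofList _ _).mp hb
        have hbne : b ≠ m := by
          have := List.of_mem_filter hbmem; simpa using this
        have hbL : b ∈ L' := List.mem_of_mem_filter hbmem
        obtain ⟨tok, htok, hmap⟩ := List.mem_filterMap.mp hbL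
        have hsome : (pbFirstIndex a b (i + 1) rest).isSome = true :=
          (pv_fi_isSome a b rest (i + 1)).mpr ⟨tok, htok, hmap⟩
        obtain ⟨j, hj⟩ := Option.isSome_iff_exists.mp hsome
        have hge : i + 1 ≤ j := pv_fi_ge a b rest (i + 1) j hj
        rw [hkeym, hkeyne b hbne, hj]
        simp; omega
      · have hfil : PySem.Set.ofList (L'.filter (fun y => !(y == m)))
            = (PySem.Set.ofList L').filter (fun y => !(y == m)) := pv_ofList_filter _ _
        rw [hfil]
        have hpw := (ih (i + 1)).filter (fun y => !(y == m))
        refine hpw.imp_of_mem ?_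
        intro x y hx hy hxy
        have hxne : x ≠ m := by have := List.of_mem_filter hx; simpa using this
        have hyne : y ≠ m := by have := List.of_mem_filter hy; simpa using this
        rw [hkeyne x hxne, hkeyne y hyne]
        exact hxy

-- ===== VERDICT (by name: the statement is the Claim_ definition above) =====
theorem parse_database_choices_py_spec : Claim_equal_parse_database_choices_py := by
  intro raw _
  unfold Spec_parse_database_choices_py
  simp only [parse_database_choices_py, parse_database_choices_py_alt]
  rw [pv_fused_eq, PySem.Set.update_nil_left]
  set tokens0 := (PySem.Str.split? raw ",").getD [] with htokens0
  set tokens := tokens0.map (fun token => PySem.Str.lower (PySem.Str.strip token)) with htokens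
  have hL : tokens0.filterMap (fun token =>
      match pvAM.get? (PySem.Str.lower (PySem.Str.strip token)) with
      | some m => if m == "" then none else some m
      | none => none) = tokens.filterMap pvAM.get? := by
    rw [htokens, List.filterMap_map]
    apply List.filterMap_congr
    intro t _
    rcases pv_get_cases (PySem.Str.lower (PySem.Str.strip t)) with hc | ⟨m, hm, _, hne⟩
    · simp [Function.comp, hc]
    · simp [Function.comp, hm, hne]
  rw [show (PySem.Dict.ofList
    [("postgres", "postgresql"), ("postgresql", "postgresql"), ("mysql", "mysql"),
     ("cubrid", "cubrid"), ("custom", "custom")] : PySem.Dict String String) = pvAM from rfl]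
  rw [hL]
  rw [pv_found_eq (fun n => pbFirstIndex pvAM n 0 tokens) _ []]
  simp only [List.nil_append]
  set L := tokens.filterMap pvAM.get? with hLdef
  set W := (PySem.Set.ofList L).map (fun n => ((pbFirstIndex pvAM n 0 tokens).getD 0, n)) with hW
  have hperm : (PySem.Set.ofList L).Perm
      (pvCanon.filter (fun n => (pbFirstIndex pvAM n 0 tokens).isSome)) := by
    rw [List.perm_ext_iff_of_nodup (PySem.Set.nodup_ofList L)
      ((by decide : pvCanon.Nodup).filter _)]
    intro x
    rw [PySem.Set.mem_ofList, List.mem_filter]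
    constructor
    · intro hx
      obtain ⟨t, ht, hmap⟩ := List.mem_filterMap.mp hx
      refine ⟨?_, (pv_fi_isSome pvAM x tokens 0).mpr ⟨t, ht, hmap⟩⟩
      rcases pv_get_cases t with hc | ⟨m, hm, hmc, _⟩
      · rw [hc] at hmap; cases hmap
      · rw [hm] at hmap; cases hmap; exact hmc
    · rintro ⟨-, hsome⟩
      obtain ⟨t, ht, hmap⟩ := (pv_fi_isSome pvAM x tokens 0).mp hsome
      exact List.mem_filterMap.mpr ⟨t, ht, hmap⟩
  have hWperm : W.Perm ((pvCanon.filter (fun n => (pbFirstIndex pvAM n 0 tokens).isSome)).map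
      (fun n => ((pbFirstIndex pvAM n 0 tokens).getD 0, n))) := hperm.map _
  have hWpw : W.Pairwise (fun p q => p.1 < q.1) := by
    rw [hW, List.pairwise_map]
    exact pv_crux pvAM tokens 0
  rw [show pvCanon = ["postgresql", "mysql", "cubrid", "custom"] from rfl] at hWperm
  rw [PySem.List.sorted_eq_of_perm_of_pairwise_lt _ W (fun pair => pair.1) hWperm hWpw]
  rw [hW, List.map_map]
  have hid : ((fun pair : Int × String => pair.2) ∘ fun n : String =>
      ((pbFirstIndex pvAM n 0 tokens).getD 0, n)) = id := rfl
  rw [hid, List.map_id]
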